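-- pv_equiv track=rewrite | github.com/virtuozzo/aibot | vzbot-parser/vzbot-parser.py | sanitize
-- ===== SOURCE A (Python) =====
-- def sanitize(l):
--
--     while l and l[0] == '\n':
--         l.pop(0)
--
--     while l and l[-1] == '\n':
--         l.pop()
--
--     result = []
--     count = 0
--     for i in l:
--         if i == '\n':
--             count += 1
--         else:
--             count = 0
--         if count < 3:
--             result.append(i)
--
--     return result
-- ===== SOURCE B (Python) =====
-- def sanitize(l):
--
--     while l and l[0] == '\n':
--         l.pop(0)
--
--     while l and l[-1] == '\n':
--         l.pop()
--
--     result = []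
--     j, n = 0, len(l)
--     while j < n:
--         k = j
--         while k < n and l[k] == '\n':
--             k += 1
--         if k == j:
--             result.append(l[j])
--             j += 1
--         else:
--             result.extend(['\n'] * min(k - j, 2))
--             j = k
--     return result
-- ===== Notes on version B (the rewrite author's own statement) =====
-- stated objective: alternative
-- what changed: B replaces A's per-element pass with a stateful newline counter by a two-pointer run scanner: it finds each maximal newline run at once and emits min(run,2) newlines, copying other elements one by one (the pop-based edge trimming, and its mutation of l, is kept identical).
import Mathlib
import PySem

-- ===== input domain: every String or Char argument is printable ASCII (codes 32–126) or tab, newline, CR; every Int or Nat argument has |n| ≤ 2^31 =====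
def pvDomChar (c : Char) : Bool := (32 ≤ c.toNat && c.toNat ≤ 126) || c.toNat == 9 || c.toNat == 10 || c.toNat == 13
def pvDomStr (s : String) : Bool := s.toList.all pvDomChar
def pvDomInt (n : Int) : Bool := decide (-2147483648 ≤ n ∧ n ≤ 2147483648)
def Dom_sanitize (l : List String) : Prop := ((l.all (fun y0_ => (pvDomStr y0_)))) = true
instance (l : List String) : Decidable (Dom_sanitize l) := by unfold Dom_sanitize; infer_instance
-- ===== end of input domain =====

-- B replaces A's stateful newline-counter pass by a two-pointer run scanner (alternative structure,
-- same cost). Both Pythons mutate the argument identically (the pop-based trimming loops are shared);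
-- the trimming helpers below are therefore common to both ports.

-- ===== PORT A =====
-- while l and l[0] == '\n': l.pop(0)
def trimFront : List String → List String
  | [] => []
  | x :: xs => if x = "\n" then trimFront xs else x :: xs

-- while l and l[-1] == '\n': l.pop()
def trimBack (l : List String) : List String :=
  if h : l.getLast? = some "\n" then trimBack l.dropLast else l
termination_by l.length
decreasing_by
  have hne : l ≠ [] := fun hnil => by rw [hnil, List.getLast?_nil] at h; exact (Option.some_ne_none _ h.symm)
  rw [List.length_dropLast]
  exact Nat.sub_lt (List.length_pos_iff.mpr hne) Nat.one_pos

-- for i in l: count bookkeeping; append when count < 3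
def sanitize (l : List String) : List String :=
  let t := trimBack (trimFront l)
  (t.foldl (fun (st : List String × Nat) i =>
      let c := if i = "\n" then st.2 + 1 else 0
      (if c < 3 then st.1 ++ [i] else st.1, c)) ([], 0)).1

-- ===== PORT B =====
-- inner scan: k = j; while k < n and l[k] == '\n': k += 1
def runEnd (t : List String) (k : Nat) : Nat :=
  if h : k < t.length then
    if t.getD k "" = "\n" then runEnd t (k + 1) else k
  else k
termination_by t.length - k
decreasing_by exact Nat.sub_succ_lt_self _ _ h

lemma runEnd_ge (t : List String) (k : Nat) : k ≤ runEnd t k := by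
  fun_induction runEnd t k with
  | case1 k h hnl ih => exact Nat.le_of_succ_le ih
  | case2 k h hnl => exact Nat.le_refl k
  | case3 k h => exact Nat.le_refl k

-- outer while j < n loop with result accumulator (k names runEnd t j)
def bLoop (t : List String) (j : Nat) (result : List String) : List String :=
  if h : j < t.length then
    if hk : runEnd t j = j then bLoop t (j + 1) (result ++ [t.getD j ""])
    else bLoop t (runEnd t j) (result ++ List.replicate (min (runEnd t j - j) 2) "\n")
  else result
termination_by t.length - j
decreasing_by
  · exact Nat.sub_succ_lt_self _ _ h
  · exact Nat.sub_lt_sub_left h (Nat.lt_of_le_of_ne (runEnd_ge t j) (fun e => hk e.symm))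

def sanitize_alt (l : List String) : List String :=
  let t := trimBack (trimFront l)
  bLoop t 0 []

-- ===== PRECONDITION & SPEC =====
def Spec_sanitize (l : List String) (out : List String) : Prop := out = sanitize_alt l
instance (l : List String) (out : List String) : Decidable (Spec_sanitize l out) := by unfold Spec_sanitize; infer_instance

-- ===== CLAIM (what is proved, stated in full; the proofs are below) =====
def Claim_equal_sanitize : Prop := ∀ (l : List String), Dom_sanitize l → Spec_sanitize l (sanitize l)

-- ===== LEMMAS AND PROOFS =====

-- pure (accumulator-free) form of A's counter loop
def aRec : List String → Nat → List String
  | [], _ => []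
  | i :: t, c =>
      let c' := if i = "\n" then c + 1 else 0
      (if c' < 3 then [i] else []) ++ aRec t c'

lemma foldl_eq_aRec (t : List String) (acc : List String) (c : Nat) :
    (t.foldl (fun (st : List String × Nat) i =>
      let c := if i = "\n" then st.2 + 1 else 0
      (if c < 3 then st.1 ++ [i] else st.1, c)) (acc, c)).1 = acc ++ aRec t c := by
  induction t generalizing acc c with
  | nil => simp [aRec]
  | cons i t ih =>
      simp only [List.foldl_cons, aRec]
      split_ifs with h1 h2 <;> simp_all

-- length of the newline prefix
def nlPref : List String → Nat
  | [] => 0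
  | x :: xs => if x = "\n" then nlPref xs + 1 else 0

lemma runEnd_eq (t : List String) (j : Nat) : runEnd t j = j + nlPref (t.drop j) := by
  fun_induction runEnd t j with
  | case1 k h hnl ih =>
      have hd : t.drop k = t.getD k "" :: t.drop (k + 1) := by
        rw [List.getD_eq_getElem _ _ h, ← List.getElem_cons_drop h]
      rw [ih, hd, nlPref, if_pos hnl]; omega
  | case2 k h hnl =>
      have hd : t.drop k = t.getD k "" :: t.drop (k + 1) := by
        rw [List.getD_eq_getElem _ _ h, ← List.getElem_cons_drop h]
      rw [hd, nlPref, if_neg hnl]; omega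
  | case3 k h =>
      rw [List.drop_eq_nil_of_le (by omega)]; simp [nlPref]

-- pure form of B's outer loop
def bRec : List String → List String
  | [] => []
  | x :: xs =>
      if hm : nlPref (x :: xs) = 0 then x :: bRec xs
      else List.replicate (min (nlPref (x :: xs)) 2) "\n"
             ++ bRec ((x :: xs).drop (nlPref (x :: xs)))
termination_by s => s.length
decreasing_by
  · simp
  · have : 0 < nlPref (x :: xs) := Nat.pos_of_ne_zero hm
    simp [List.length_drop]; omega

lemma bLoop_eq_bRec (t : List String) (j : Nat) (res : List String) :
    bLoop t j res = res ++ bRec (t.drop j) := by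
  fun_induction bLoop t j res with
  | case1 j res h hk ih =>
      have hd : t.drop j = t.getD j "" :: t.drop (j + 1) := by
        rw [List.getD_eq_getElem _ _ h, ← List.getElem_cons_drop h]
      have hm : nlPref (t.drop j) = 0 := by
        have := runEnd_eq t j; omega
      rw [hd] at hm
      rw [ih, hd, bRec, dif_pos hm]
      simp
  | case2 j res h hk ih =>
      have hre := runEnd_eq t j
      have hd : t.drop j = t.getD j "" :: t.drop (j + 1) := by
        rw [List.getD_eq_getElem _ _ h, ← List.getElem_cons_drop h]
      have hm : nlPref (t.drop j) ≠ 0 := by intro h0; exact hk (by omega)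
      rw [hd] at hm
      rw [ih, hd, bRec, dif_neg hm]
      rw [← hd] at hm ⊢
      rw [List.append_assoc]
      congr 2
      · congr 1; omega
      · rw [List.drop_drop]; congr 1; rw [hre]
  | case3 j res h =>
      rw [List.drop_eq_nil_of_le (by omega)]; simp [bRec]

-- aRec ignores the incoming count once a non-newline is seen first
lemma aRec_reset (s : List String) (c : Nat) (hs : nlPref s = 0) : aRec s c = aRec s 0 := by
  cases s with
  | nil => rfl
  | cons x xs =>
      have hx : ¬ x = "\n" := by simpa [nlPref] using fun h => by simp [nlPref, h] at hs
      simp [aRec, hx]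

-- A's counter loop across a newline run
lemma aRec_run (m : Nat) (c : Nat) (rest : List String) :
    aRec (List.replicate m "\n" ++ rest) c
      = List.replicate (min m (2 - c)) "\n" ++ aRec rest (c + m) := by
  induction m generalizing c with
  | zero => simp
  | succ m ih =>
      rw [List.replicate_succ, List.cons_append]
      have hstep : aRec ("\n" :: (List.replicate m "\n" ++ rest)) c
          = (if c + 1 < 3 then ["\n"] else []) ++ aRec (List.replicate m "\n" ++ rest) (c + 1) := by
        simp [aRec]
      have e2 : c + 1 + m = c + (m + 1) := by omega
      rw [hstep, ih (c + 1), e2]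
      by_cases h1 : c + 1 < 3
      · have e1 : min (m + 1) (2 - c) = min m (2 - (c + 1)) + 1 := by omega
        rw [if_pos h1, e1, List.replicate_succ]
        simp
      · have e1 : min (m + 1) (2 - c) = min m (2 - (c + 1)) := by omega
        rw [if_neg h1, e1]
        simp

lemma nlPref_drop (s : List String) : nlPref (s.drop (nlPref s)) = 0 := by
  induction s with
  | nil => simp [nlPref]
  | cons x xs ih =>
      by_cases hx : x = "\n"
      · simp [nlPref, hx, ih]
      · simp [nlPref, hx]

lemma replicate_nlPref_append (s : List String) :
    List.replicate (nlPref s) "\n" ++ s.drop (nlPref s) = s := by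
  induction s with
  | nil => simp [nlPref]
  | cons x xs ih =>
      by_cases hx : x = "\n"
      · simp [nlPref, hx, List.replicate_succ, ih]
      · simp [nlPref, hx]

lemma bRec_eq_aRec (s : List String) : bRec s = aRec s 0 := by
  fun_induction bRec s with
  | case1 => rfl
  | case2 x xs hm ih =>
      have hx : ¬ x = "\n" := by
        intro h; simp [nlPref, h] at hm
      rw [ih]
      simp [aRec, hx]
  | case3 x xs hm ih =>
      have hrun : x :: xs
          = List.replicate (nlPref (x :: xs)) "\n" ++ (x :: xs).drop (nlPref (x :: xs)) :=
        (replicate_nlPref_append (x :: xs)).symm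
      rw [ih]
      conv_rhs => rw [hrun]
      rw [aRec_run]
      simp [aRec_reset (List.drop (nlPref (x :: xs)) (x :: xs)) (nlPref (x :: xs))
              (nlPref_drop (x :: xs))]

-- ===== VERDICT (by name: the statement is the Claim_ definition above) =====
theorem sanitize_spec : Claim_equal_sanitize := by
  intro l _
  unfold Spec_sanitize sanitize sanitize_alt
  rw [foldl_eq_aRec, bLoop_eq_bRec]
  simp [bRec_eq_aRec]
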